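-- pv_equiv track=rewrite | github.com/emoshawty666/algolabs | lab4.py | process_numbers
-- ===== SOURCE A (Python) =====
-- def process_numbers(input_numbers):
--     current_set = set()
--
--     for number in input_numbers:
--         if number > 0:
--             current_set.add(number)
--         elif number < 0:
--             current_set.discard(-number)
--         elif number == 0:
--             return sorted(current_set)
--
--     return sorted(current_set)
-- ===== SOURCE B (Python) =====
-- def process_numbers(input_numbers):
--     # Cut the list at the first zero (A returns early there), then decide each
--     # candidate value independently: a positive value v survives iff the last
--     # occurrence of its magnitude (+v or -v) in that prefix is positive.
--     if 0 in input_numbers: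
--         prefix = input_numbers[:input_numbers.index(0)]
--     else:
--         prefix = input_numbers
--     result = []
--     for v in sorted(set(prefix)):
--         if v > 0:
--             occurrences = [n for n in prefix if n == v or n == -v]
--             if occurrences[-1] > 0:
--                 result.append(v)
--     return result
-- ===== Notes on version B (the rewrite author's own statement) =====
-- stated objective: alternative
-- what changed: B first cuts the list at the first zero with index/slice, then for each candidate in sorted(set(prefix)) rescans the prefix for occurrences of +v/-v and keeps v iff the last such occurrence is positive: staged per-candidate scans instead of A's incremental set add/discard maintenance.
import Mathlib
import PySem

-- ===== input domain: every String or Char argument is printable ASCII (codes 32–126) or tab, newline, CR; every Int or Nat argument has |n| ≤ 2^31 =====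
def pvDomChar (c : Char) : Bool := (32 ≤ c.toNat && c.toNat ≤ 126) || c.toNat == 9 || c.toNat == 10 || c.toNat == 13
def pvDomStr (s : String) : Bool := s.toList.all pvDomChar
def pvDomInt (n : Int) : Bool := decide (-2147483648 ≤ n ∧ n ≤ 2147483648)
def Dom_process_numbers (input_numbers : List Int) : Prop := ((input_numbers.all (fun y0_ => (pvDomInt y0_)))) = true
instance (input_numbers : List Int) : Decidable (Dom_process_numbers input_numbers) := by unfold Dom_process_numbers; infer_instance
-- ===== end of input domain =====

-- B cuts the input at the first zero and then decides each candidate of sorted(set(prefix))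
-- by a fresh scan for its ±magnitude occurrences (last one positive ⇒ keep), instead of A's
-- incremental set add/discard loop; alternative decomposition, same result.

-- ===== PORT A =====
-- the for-loop over input_numbers with the mutable set, returning early at the first zero
def pvALoop (l : List Int) (current_set : PySem.Set Int) : List Int :=
  match l with
  | [] => PySem.List.sorted current_set (fun x => x) false
  | number :: rest =>
    if number > 0 then pvALoop rest (PySem.Set.add current_set number)
    else if number < 0 then pvALoop rest (PySem.Set.discard current_set (-number))
    else PySem.List.sorted current_set (fun x => x) false   -- number == 0: early return

def process_numbers (input_numbers : List Int) : List Int :=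
  pvALoop input_numbers PySem.Set.empty

-- ===== PORT B =====
-- prefix = input_numbers[:input_numbers.index(0)] if 0 in input_numbers else input_numbers
def pvBPrefix (l : List Int) : List Int :=
  if (0 : Int) ∈ l then
    PySem.List.slice l (some 0) (some (((PySem.List.index? l 0).getD 0 : Nat) : Int))
  else l

-- the for-loop over sorted(set(prefix)) with the per-candidate occurrence scan;
-- occurrences[-1] via pyGet?: the none case (IndexError) is unreachable since v ∈ prefix
def process_numbers_alt (input_numbers : List Int) : List Int :=
  let pre := pvBPrefix input_numbers
  (PySem.List.sorted (PySem.Set.ofList pre) (fun x => x) false).foldl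
    (fun result v =>
      if v > 0 then
        let occurrences := pre.filter (fun n => n == v || n == -v)
        if (match PySem.List.pyGet? occurrences (-1) with
            | some m => decide (m > 0)
            | none => false) then result ++ [v] else result
      else result) []

-- ===== PRECONDITION & SPEC =====
def Spec_process_numbers (input_numbers : List Int) (out : List Int) : Prop := out = process_numbers_alt input_numbers
instance (input_numbers : List Int) (out : List Int) : Decidable (Spec_process_numbers input_numbers out) := by unfold Spec_process_numbers; infer_instance

-- ===== CLAIM (what is proved, stated in full; the proofs are below) =====
def Claim_equal_process_numbers : Prop := ∀ (input_numbers : List Int), Dom_process_numbers input_numbers → Spec_process_numbers input_numbers (process_numbers input_numbers)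

-- ===== LEMMAS AND PROOFS =====

-- the pure set-building fold over a (cut) list
def pvF (l : List Int) (s : PySem.Set Int) : PySem.Set Int :=
  l.foldl (fun s n => if n > 0 then PySem.Set.add s n else PySem.Set.discard s (-n)) s

-- B's prefix slice, when a zero is present, is the longest zero-free prefix
theorem pvBPrefix_slice_eq (l : List Int) (h : (0 : Int) ∈ l) :
    PySem.List.slice l (some 0) (some (((PySem.List.index? l 0).getD 0 : Nat) : Int))
      = l.takeWhile (fun n => !(n == 0)) := by
  induction l with
  | nil => simp at h
  | cons x xs ih =>
    by_cases hx : x = (0 : Int)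
    · subst hx
      rw [PySem.List.index?_cons_self]
      simp only [Option.getD_some, PySem.List.slice_zero_start]
      rw [PySem.List.slice_to_natCast]
      simp [List.takeWhile]
    · have hm : (0 : Int) ∈ xs := by
        rcases List.mem_cons.1 h with h0 | h0
        · exact absurd h0.symm hx
        · exact h0
      rw [PySem.List.index?_cons_of_ne _ hx]
      obtain ⟨k, hk⟩ := Option.isSome_iff_exists.1 ((PySem.List.index?_isSome_iff _ _).2 hm)
      have hrec := ih hm
      rw [hk] at hrec ⊢
      simp only [Option.map_some, Option.getD_some] at hrec ⊢
      simp only [PySem.List.slice_zero_start] at hrec ⊢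
      rw [PySem.List.slice_to_natCast] at hrec ⊢
      simp [List.take_succ_cons, hx, hrec]

-- B's prefix is the longest zero-free prefix
theorem pvBPrefix_eq_takeWhile (l : List Int) :
    pvBPrefix l = l.takeWhile (fun n => !(n == 0)) := by
  unfold pvBPrefix
  by_cases h : (0 : Int) ∈ l
  · simpa [h] using pvBPrefix_slice_eq l h
  · simp only [h, if_false]
    symm
    rw [List.takeWhile_eq_self_iff]
    intro x hx
    simp only [Bool.not_eq_eq_eq_not, Bool.not_true, beq_eq_false_iff_ne]
    intro h0; exact h (h0 ▸ hx)

-- A's early-returning loop is the fold over the zero-free prefix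
theorem pvALoop_eq_takeWhile (l : List Int) (s : PySem.Set Int) :
    pvALoop l s = PySem.List.sorted (pvF (l.takeWhile (fun n => !(n == 0))) s) (fun x => x) false := by
  induction l generalizing s with
  | nil => simp [pvALoop, pvF]
  | cons n rest ih =>
    by_cases h0 : n = 0
    · subst h0; simp [pvALoop, pvF]
    · by_cases hp : n > 0
      · simp [pvALoop, hp, h0, pvF, ih]
      · have hn : n < 0 := by omega
        simp [pvALoop, hp, hn, h0, pvF, ih]

theorem pvF_nodup (l : List Int) (s : PySem.Set Int) (hs : s.Nodup) : (pvF l s).Nodup := by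
  induction l generalizing s with
  | nil => simpa [pvF]
  | cons n rest ih =>
    simp only [pvF, List.foldl_cons]
    split_ifs with hp
    · exact ih _ (PySem.Set.nodup_add _ _ hs)
    · exact ih _ (PySem.Set.nodup_discard _ _ hs)

-- every element of the built set is positive or was already in s
theorem pvF_pos (l : List Int) (s : PySem.Set Int) (x : Int) (hx : x ∈ pvF l s) :
    x ∈ s ∨ 0 < x := by
  induction l generalizing s with
  | nil => exact Or.inl (by simpa [pvF] using hx)
  | cons n rest ih =>
    simp only [pvF, List.foldl_cons] at hx
    split_ifs at hx with hp
    · rcases ih _ hx with h | h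
      · rcases (PySem.Set.mem_add _ _ _).1 h with h' | h'
        · exact Or.inl h'
        · exact Or.inr (h' ▸ hp)
      · exact Or.inr h
    · rcases ih _ hx with h | h
      · exact Or.inl ((PySem.Set.mem_discard _ _ _).1 h).1
      · exact Or.inr h

-- membership characterization for a positive candidate x: decided by the last ±x occurrence
theorem pvF_mem_iff (l : List Int) (s : PySem.Set Int) (x : Int) (hxpos : 0 < x) :
    (x ∈ pvF l s ↔
      ((l.filter (fun n => n == x || n == -x)).getLast? = none ∧ x ∈ s) ∨
       (l.filter (fun n => n == x || n == -x)).getLast? = some x) := by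
  induction l generalizing s with
  | nil => simp [pvF]
  | cons n rest ih =>
    have hstep : x ∈ pvF (n :: rest) s
        ↔ x ∈ pvF rest (if n > 0 then PySem.Set.add s n else PySem.Set.discard s (-n)) := by
      by_cases hp : n > 0 <;> simp [pvF, hp]
    rw [hstep, ih, List.filter_cons]
    by_cases hnx : n = x
    · subst hnx
      have hp : n > 0 := hxpos
      simp only [hp, BEq.refl, Bool.true_or, if_pos]
      rcases hlast : (rest.filter (fun m => m == n || m == -n)).getLast? with _ | m
      · simp [List.getLast?_cons, List.getLast?_eq_none_iff.1 hlast, PySem.Set.mem_add]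
      · simp [List.getLast?_cons, hlast, PySem.Set.mem_add]
    · by_cases hnnx : n = -x
      · have hnn : ¬ (n > 0) := by omega
        have hnegn : -n = x := by omega
        have htest : (n == x || n == -x) = true := by simp [hnnx]
        rw [if_pos htest, if_neg hnn, hnegn]
        rcases hlast : (rest.filter (fun m => m == x || m == -x)).getLast? with _ | m
        · simp [List.getLast?_cons, List.getLast?_eq_none_iff.1 hlast,
            PySem.Set.mem_discard, hnx]
        · simp [List.getLast?_cons, hlast, PySem.Set.mem_discard]
      · have hfilt : (n == x || n == -x) = false := by simp [hnx, hnnx]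
        simp only [hfilt, Bool.false_eq_true, not_false_iff, if_neg]
        have hxn : x ≠ n := fun h => hnx h.symm
        have hxnn : x ≠ -n := fun h => hnnx (by omega)
        by_cases hp : n > 0
        · simp [hp, PySem.Set.mem_add, hxn]
        · simp [hp, PySem.Set.mem_discard, hxnn]

-- B's per-candidate test, as a Bool predicate on the candidate
def pvQ (P : List Int) (v : Int) : Bool :=
  decide (v > 0) &&
    (match PySem.List.pyGet? (P.filter (fun n => n == v || n == -v)) (-1) with
     | some m => decide (m > 0)
     | none => false)

-- B's append loop is a filter of the sorted candidate list
theorem pvAlt_eq_filter (l : List Int) :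
    process_numbers_alt l =
      (PySem.List.sorted (PySem.Set.ofList (pvBPrefix l)) (fun x => x) false).filter
        (pvQ (pvBPrefix l)) := by
  simp only [process_numbers_alt]
  have hbody : ∀ (acc : List Int) (v : Int), v ∈ PySem.List.sorted (PySem.Set.ofList (pvBPrefix l)) (fun x => x) false →
      (if v > 0 then
        (if (match PySem.List.pyGet? ((pvBPrefix l).filter (fun n => n == v || n == -v)) (-1) with
             | some m => decide (m > 0)
             | none => false) then acc ++ [v] else acc)
       else acc)
      = (if pvQ (pvBPrefix l) v then acc ++ [v] else acc) := by
    intro acc v _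
    by_cases hv : v > 0 <;> simp [pvQ, hv]
  rw [PySem.List.foldl_congr_mem _ _ _ _ hbody, PySem.List.foldl_append_if_eq_filter]
  simp

-- what A's set contains, phrased with B's test
theorem pvF_mem_iff_Q (P : List Int) (x : Int) :
    x ∈ pvF P PySem.Set.empty ↔ x ∈ P ∧ pvQ P x = true := by
  constructor
  · intro hx
    have hxpos : 0 < x := by
      rcases pvF_pos P PySem.Set.empty x hx with h | h
      · simp [PySem.Set.empty] at h
      · exact h
    have hlast : (P.filter (fun n => n == x || n == -x)).getLast? = some x := by
      rcases (pvF_mem_iff P PySem.Set.empty x hxpos).1 hx with ⟨_, hmem⟩ | h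
      · simp [PySem.Set.empty] at hmem
      · exact h
    have hxP : x ∈ P := by
      have := List.mem_of_getLast? hlast
      exact (List.mem_filter.1 this).1
    refine ⟨hxP, ?_⟩
    simp [pvQ, PySem.List.pyGet?_neg_one, hlast, hxpos]
  · rintro ⟨hxP, hq⟩
    simp only [pvQ, PySem.List.pyGet?_neg_one, Bool.and_eq_true, decide_eq_true_eq] at hq
    obtain ⟨hxpos, hc⟩ := hq
    rcases hlast : (P.filter (fun n => n == x || n == -x)).getLast? with _ | m
    · rw [hlast] at hc; simp at hc
    · rw [hlast] at hc
      simp only [decide_eq_true_eq] at hc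
      have hm : m ∈ P.filter (fun n => n == x || n == -x) := List.mem_of_getLast? hlast
      have : m = x ∨ m = -x := by
        have := (List.mem_filter.1 hm).2
        simpa using this
      have hmx : m = x := by
        rcases this with h | h
        · exact h
        · omega
      exact (pvF_mem_iff P PySem.Set.empty x hxpos).2 (Or.inr (hmx ▸ hlast))

-- ===== VERDICT (by name: the statement is the Claim_ definition above) =====
theorem process_numbers_spec : Claim_equal_process_numbers := by
  intro l _
  show process_numbers l = process_numbers_alt l
  unfold process_numbers
  rw [pvALoop_eq_takeWhile, ← pvBPrefix_eq_takeWhile, pvAlt_eq_filter]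
  have hSnodup : (PySem.List.sorted (PySem.Set.ofList (pvBPrefix l)) (fun x => x) false).Nodup :=
    ((PySem.List.sorted_perm _ _ _).nodup_iff).2 (PySem.Set.nodup_ofList _)
  have hSlt : (PySem.List.sorted (PySem.Set.ofList (pvBPrefix l)) (fun x => x) false).Pairwise (· < ·) := by
    have hle := PySem.List.sorted_pairwise (PySem.Set.ofList (pvBPrefix l)) (fun x : Int => x)
    exact (hle.and hSnodup).imp (fun h => lt_of_le_of_ne h.1 h.2)
  apply PySem.List.sorted_eq_of_perm_of_pairwise_lt
  · apply (List.perm_ext_iff_of_nodup (hSnodup.filter _) (pvF_nodup _ _ (by simp [PySem.Set.empty]))).2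
    intro x
    rw [List.mem_filter, pvF_mem_iff_Q]
    constructor
    · rintro ⟨hS, hq⟩
      exact ⟨by simpa [PySem.Set.mem_ofList] using (PySem.List.sorted_perm _ _ _).mem_iff.1 hS, hq⟩
    · rintro ⟨hP, hq⟩
      refine ⟨(PySem.List.sorted_perm _ _ _).mem_iff.2 ?_, hq⟩
      exact (PySem.Set.mem_ofList _ _).2 hP
  · exact hSlt.filter _
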